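-- pv_equiv track=rewrite | github.com/dbioc504/Intro-to-CS-Coursework | main.py | diff_family_names
-- ===== SOURCE A (Python) =====
-- def diff_family_names(name_list):
--     families = []
--     for i in range(len(name_list)):
--         split = name_list[i].split(',')
--         name_list[i] = split[0][1:]
--         families.append(name_list[i])
--     lastnames = len(set(families))
--     return lastnames
-- ===== SOURCE B (Python) =====
-- def diff_family_names(name_list):
--     for i in range(len(name_list)):
--         name_list[i] = name_list[i].split(',')[0][1:]
--     count = 0
--     prev = None
--     for fam in sorted(name_list):
--         if fam != prev:
--             count += 1
--         prev = fam
--     return count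
-- ===== Notes on version B (the rewrite author's own statement) =====
-- stated objective: alternative
-- what changed: B drops the separate families accumulator (the mutated list itself holds the family names) and counts distinct names by sorting and scanning adjacent runs with a prev variable instead of building a hash set.
import Mathlib
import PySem

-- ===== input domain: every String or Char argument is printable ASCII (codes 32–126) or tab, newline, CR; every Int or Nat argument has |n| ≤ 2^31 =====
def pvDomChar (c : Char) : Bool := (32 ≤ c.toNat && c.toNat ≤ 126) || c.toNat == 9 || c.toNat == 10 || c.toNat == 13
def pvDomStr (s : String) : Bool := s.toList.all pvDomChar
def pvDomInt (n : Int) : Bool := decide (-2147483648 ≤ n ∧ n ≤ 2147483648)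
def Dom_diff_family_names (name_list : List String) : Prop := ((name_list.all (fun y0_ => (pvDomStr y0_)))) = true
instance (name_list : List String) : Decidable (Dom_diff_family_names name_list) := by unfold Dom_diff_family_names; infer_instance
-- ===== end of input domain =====

-- B replaces set-based distinct counting by sort-then-scan over runs (objective: alternative);
-- both versions mutate name_list in place in the same way, the equivalence proved is about the return value.

-- ===== PORT A =====
def diff_family_names (name_list : List String) : Int :=
  let st := (PySem.List.pyRange 0 (PySem.List.len name_list) 1).foldl
    (fun (st : List String × List String) i =>
      let split := (PySem.Str.split? (PySem.List.pyGetD st.1 i "") ",").getD []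
      let nm := PySem.Str.slice (split.headD "") (some 1) none
      (PySem.List.pySetD st.1 i nm, st.2 ++ [nm]))
    (name_list, [])
  let lastnames := (PySem.Set.ofList st.2).length
  (lastnames : Int)

-- ===== PORT B =====
def diff_family_names_alt (name_list : List String) : Int :=
  let lst := (PySem.List.pyRange 0 (PySem.List.len name_list) 1).foldl
    (fun (lst : List String) i =>
      PySem.List.pySetD lst i
        (PySem.Str.slice (((PySem.Str.split? (PySem.List.pyGetD lst i "") ",").getD []).headD "") (some 1) none))
    name_list
  ((PySem.List.sorted lst (fun x => x) false).foldl
    (fun (st : Int × Option String) fam =>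
      (if some fam ≠ st.2 then st.1 + 1 else st.1, some fam))
    (0, none)).1

-- ===== PRECONDITION & SPEC =====
def Spec_diff_family_names (name_list : List String) (out : Int) : Prop := out = diff_family_names_alt name_list
instance (name_list : List String) (out : Int) : Decidable (Spec_diff_family_names name_list out) := by unfold Spec_diff_family_names; infer_instance

-- ===== CLAIM (what is proved, stated in full; the proofs are below) =====
def Claim_equal_diff_family_names : Prop := ∀ (name_list : List String), Dom_diff_family_names name_list → Spec_diff_family_names name_list (diff_family_names name_list)

-- ===== LEMMAS AND PROOFS =====

-- the per-name transformation: name.split(',')[0][1:]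
def pvFam (s : String) : String :=
  PySem.Str.slice (((PySem.Str.split? s ",").getD []).headD "") (some 1) none

lemma pvLoopA (xs : List String) (acc : List String) (n : Nat) (hn : n ≤ xs.length) :
    (PySem.List.pyRange 0 (n : Int) 1).foldl
      (fun (st : List String × List String) i =>
        let split := (PySem.Str.split? (PySem.List.pyGetD st.1 i "") ",").getD []
        let nm := PySem.Str.slice (split.headD "") (some 1) none
        (PySem.List.pySetD st.1 i nm, st.2 ++ [nm]))
      (xs, acc)
    = ((xs.take n).map pvFam ++ xs.drop n, acc ++ (xs.take n).map pvFam) := by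
  induction n with
  | zero => simp [PySem.List.pyRange_one_eq_nil (le_refl (0 : Int))]
  | succ n ih =>
    have hn' : n ≤ xs.length := by omega
    have hlt : n < xs.length := by omega
    have hlen : ((xs.take n).map pvFam).length = n := by simp [Nat.min_eq_left hn']
    have hcast : ((n + 1 : Nat) : Int) = (n : Int) + 1 := by push_cast; ring
    rw [hcast, PySem.List.pyRange_one_succ_right (by positivity), List.foldl_append, ih hn']
    have hget : PySem.List.pyGetD ((xs.take n).map pvFam ++ xs.drop n) (n : Int) ""
        = xs[n] := by
      rw [PySem.List.pyGetD_natCast, List.getD,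
        List.getElem?_append_right (le_of_eq hlen), hlen, Nat.sub_self, List.getElem?_drop]
      simp [List.getElem?_eq_getElem hlt]
    have hset : PySem.List.pySetD ((xs.take n).map pvFam ++ xs.drop n) (n : Int) (pvFam xs[n])
        = (xs.take (n + 1)).map pvFam ++ xs.drop (n + 1) := by
      rw [PySem.List.pySetD_natCast, List.set_append_right _ _ (le_of_eq hlen), hlen,
        Nat.sub_self]
      have h1 : (List.drop n xs).set 0 (pvFam xs[n]) = pvFam xs[n] :: List.drop (n + 1) xs := by
        rw [List.drop_eq_getElem_cons hlt, List.set_cons_zero]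
      have h2 : List.take (n + 1) xs = List.take n xs ++ [xs[n]] := by
        rw [List.take_add_one, List.getElem?_eq_getElem hlt, Option.toList_some]
      rw [h1, h2, List.map_append, List.append_assoc, List.map_cons, List.map_nil,
        List.singleton_append]
    have hraw : PySem.Str.slice (((PySem.Str.split? xs[n] ",").getD []).headD "") (some 1) none
        = pvFam xs[n] := rfl
    have h2 : List.take (n + 1) xs = List.take n xs ++ [xs[n]] := by
      rw [List.take_add_one, List.getElem?_eq_getElem hlt, Option.toList_some]
    simp only [List.foldl_cons, List.foldl_nil, hget, hraw, hset]
    rw [h2, List.map_append, List.append_assoc, List.map_cons, List.map_nil]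
    rw [List.append_assoc]

lemma pvLoopB (xs : List String) (n : Nat) (hn : n ≤ xs.length) :
    (PySem.List.pyRange 0 (n : Int) 1).foldl
      (fun (lst : List String) i =>
        PySem.List.pySetD lst i
          (PySem.Str.slice (((PySem.Str.split? (PySem.List.pyGetD lst i "") ",").getD []).headD "") (some 1) none))
      xs
    = (xs.take n).map pvFam ++ xs.drop n := by
  induction n with
  | zero => simp [PySem.List.pyRange_one_eq_nil (le_refl (0 : Int))]
  | succ n ih =>
    have hn' : n ≤ xs.length := by omega
    have hlt : n < xs.length := by omega
    have hlen : ((xs.take n).map pvFam).length = n := by simp [Nat.min_eq_left hn']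
    have hcast : ((n + 1 : Nat) : Int) = (n : Int) + 1 := by push_cast; ring
    rw [hcast, PySem.List.pyRange_one_succ_right (by positivity), List.foldl_append, ih hn']
    have hget : PySem.List.pyGetD ((xs.take n).map pvFam ++ xs.drop n) (n : Int) ""
        = xs[n] := by
      rw [PySem.List.pyGetD_natCast, List.getD,
        List.getElem?_append_right (le_of_eq hlen), hlen, Nat.sub_self, List.getElem?_drop]
      simp [List.getElem?_eq_getElem hlt]
    have hset : PySem.List.pySetD ((xs.take n).map pvFam ++ xs.drop n) (n : Int) (pvFam xs[n])
        = (xs.take (n + 1)).map pvFam ++ xs.drop (n + 1) := by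
      rw [PySem.List.pySetD_natCast, List.set_append_right _ _ (le_of_eq hlen), hlen,
        Nat.sub_self]
      have h1 : (List.drop n xs).set 0 (pvFam xs[n]) = pvFam xs[n] :: List.drop (n + 1) xs := by
        rw [List.drop_eq_getElem_cons hlt, List.set_cons_zero]
      have h2 : List.take (n + 1) xs = List.take n xs ++ [xs[n]] := by
        rw [List.take_add_one, List.getElem?_eq_getElem hlt, Option.toList_some]
      rw [h1, h2, List.map_append, List.append_assoc, List.map_cons, List.map_nil,
        List.singleton_append]
    have hraw : PySem.Str.slice (((PySem.Str.split? xs[n] ",").getD []).headD "") (some 1) none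
        = pvFam xs[n] := rfl
    simp only [List.foldl_cons, List.foldl_nil, hget, hraw, hset]

-- the run-count fold over a sorted list counts the distinct elements different from prev
lemma pvFoldSorted (ys : List String) (h : ys.Pairwise (· ≤ ·)) (c : Int) (p : Option String)
    (hp : ∀ y ∈ ys, ∀ a, p = some a → a ≤ y) :
    (ys.foldl (fun (st : Int × Option String) fam =>
        (if some fam ≠ st.2 then st.1 + 1 else st.1, some fam)) (c, p)).1
    = c + (((PySem.Set.ofList ys).filter (fun y => decide (some y ≠ p))).length : Int) := by
  induction ys generalizing c p with
  | nil => simp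
  | cons y t ih =>
    have hy : ∀ b ∈ t, y ≤ b := fun b hb => List.rel_of_pairwise_cons h hb
    have ht : t.Pairwise (· ≤ ·) := h.of_cons
    have hdiscard : (PySem.Set.ofList t).discard y
        = (PySem.Set.ofList t).filter (fun z => decide (z ≠ y)) := by
      simp only [PySem.Set.discard]
      apply List.filter_congr
      intro z _; by_cases hzy : z = y <;> simp [hzy]
    rw [PySem.Set.ofList_cons]
    simp only [List.foldl_cons]
    rw [ih ht _ (some y) (fun b hb a ha => by cases ha; exact hy b hb)]
    rw [List.filter_cons, hdiscard, List.filter_filter]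
    by_cases hyp : some y = p
    · rw [if_neg (fun hc => hc hyp)]
      rw [if_neg (by simp [hyp])]
      have : List.filter (fun z => decide (some z ≠ p) && decide (z ≠ y)) (PySem.Set.ofList t)
          = List.filter (fun z => decide (some z ≠ some y)) (PySem.Set.ofList t) := by
        apply List.filter_congr
        intro z _
        subst hyp
        cases Decidable.em (z = y) <;> simp_all
      rw [this]
    · rw [if_pos hyp]
      rw [if_pos (by simp [hyp])]
      have : List.filter (fun z => decide (some z ≠ p) && decide (z ≠ y)) (PySem.Set.ofList t)
          = List.filter (fun z => decide (some z ≠ some y)) (PySem.Set.ofList t) := by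
        apply List.filter_congr
        intro z hz
        have hzt : z ∈ t := (PySem.Set.mem_ofList t z).mp hz
        have hyz : y ≤ z := hy z hzt
        rcases p with _ | a
        · simp
        · have hay : a ≤ y := hp y List.mem_cons_self a rfl
          have hza : z ≠ a := by
            intro hzae; apply hyp
            exact congrArg some (le_antisymm hay (hzae ▸ hyz)).symm
          cases Decidable.em (z = y) <;> simp_all
      rw [this]
      simp only [List.length_cons]
      push_cast
      ring

lemma pvDistinctPerm (l : List String) :
    (PySem.Set.ofList (PySem.List.sorted l (fun x => x) false)).length
      = (PySem.Set.ofList l).length := by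
  have hperm : (PySem.Set.ofList (PySem.List.sorted l (fun x => x) false)).Perm
      (PySem.Set.ofList l) := by
    rw [List.perm_ext_iff_of_nodup (PySem.Set.nodup_ofList _) (PySem.Set.nodup_ofList _)]
    intro x
    simp [PySem.Set.mem_ofList, PySem.List.mem_sorted]
  exact hperm.length_eq

-- ===== VERDICT (by name: the statement is the Claim_ definition above) =====
theorem diff_family_names_spec : Claim_equal_diff_family_names := by
  intro xs _
  unfold Spec_diff_family_names diff_family_names diff_family_names_alt
  have hlen : PySem.List.len xs = ((xs.length : Nat) : Int) := by simp [pysem]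
  rw [hlen, pvLoopA xs [] xs.length le_rfl, pvLoopB xs xs.length le_rfl]
  simp only [List.take_length, List.drop_length, List.append_nil, List.nil_append]
  rw [pvFoldSorted _ (PySem.List.sorted_pairwise _ _) 0 none (by simp)]
  simp [pvDistinctPerm]
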